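-- pv_equiv track=rewrite | github.com/daniel-reich/ubiquitous-fiesta | f6X7pa38iQyoytJgr_14.py | increasing_word_weights
-- ===== SOURCE A (Python) =====
-- def increasing_word_weights(sentence):
--   punctuation = '''!()-[]{};:'"\,<>./?@#$%^&*_~'''
--   sentence = sentence.translate(str.maketrans('', '', punctuation))
--   weight = 0
--   weight2 = 0
--   for word in sentence.split():
--     for i in word:
--       weight += ord(i)
--     if weight > weight2:
--       weight2 = weight
--       weight = 0
--     else:
--       return False
--   return True
-- ===== SOURCE B (Python) =====
-- def increasing_word_weights(sentence):
--     punctuation = '''!()-[]{};:'"\,<>./?@#$%^&*_~'''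
--     words = sentence.translate(str.maketrans('', '', punctuation)).split()
--     weights = [sum(map(ord, w)) for w in words]
--     # strictly increasing iff the list equals its sorted set of distinct values
--     return weights == sorted(set(weights))
-- ===== Notes on version B (the rewrite author's own statement) =====
-- stated objective: alternative
-- what changed: B never compares adjacent weights at all: it builds the weight list and tests whether it equals sorted(set(weights)) -- a list is strictly increasing exactly when it coincides with the sorted list of its distinct values -- replacing A's running-accumulator early-return state machine.
import Mathlib
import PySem

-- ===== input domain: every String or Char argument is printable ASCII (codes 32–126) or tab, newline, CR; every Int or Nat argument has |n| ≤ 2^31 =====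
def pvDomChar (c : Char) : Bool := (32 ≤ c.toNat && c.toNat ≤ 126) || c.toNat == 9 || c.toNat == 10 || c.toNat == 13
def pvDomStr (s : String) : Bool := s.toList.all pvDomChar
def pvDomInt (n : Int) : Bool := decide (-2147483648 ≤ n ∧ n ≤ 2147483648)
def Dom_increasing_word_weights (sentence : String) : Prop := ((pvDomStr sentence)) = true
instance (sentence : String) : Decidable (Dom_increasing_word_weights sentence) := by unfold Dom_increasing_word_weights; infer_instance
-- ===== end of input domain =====

-- B drops A's running-weight comparison entirely: it tests whether the weight list equals the sorted list of its distinct values (alternative; same practical cost).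

-- ===== PORT A =====
-- str.maketrans('', '', punctuation) + translate = delete exactly these characters
def pvPunct : List Char := "!()-[]{};:'\"\\,<>./?@#$%^&*_~".toList

def pvClean (cs : List Char) : List Char := cs.filter (fun c => !(pvPunct.contains c))

def pvLoopA : List (List Char) → Int → Int → Bool
  | [], _weight, _weight2 => true
  | w :: ws, weight, weight2 =>
    let weight := w.foldl (fun acc c => acc + (c.toNat : Int)) weight
    if weight > weight2 then pvLoopA ws 0 weight else false

def increasing_word_weights (sentence : String) : Bool :=
  pvLoopA (PySem.Chars.split₀ (pvClean sentence.toList)) 0 0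

-- ===== PORT B =====
def pvWeight (w : List Char) : Int := (w.map (fun c => (c.toNat : Int))).sum

def increasing_word_weights_alt (sentence : String) : Bool :=
  let weights := (PySem.Chars.split₀ (pvClean sentence.toList)).map pvWeight
  weights == PySem.List.sorted (PySem.Set.ofList weights) (fun x => x) false

-- ===== PRECONDITION & SPEC =====
def Spec_increasing_word_weights (sentence : String) (out : Bool) : Prop := out = increasing_word_weights_alt sentence
instance (sentence : String) (out : Bool) : Decidable (Spec_increasing_word_weights sentence out) := by unfold Spec_increasing_word_weights; infer_instance

-- ===== CLAIM (what is proved, stated in full; the proofs are below) =====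
def Claim_equal_increasing_word_weights : Prop := ∀ (sentence : String), Dom_increasing_word_weights sentence → Spec_increasing_word_weights sentence (increasing_word_weights sentence)

-- ===== LEMMAS AND PROOFS =====

theorem pv_foldl_weight (w : List Char) (init : Int) :
    w.foldl (fun acc c => acc + (c.toNat : Int)) init = init + pvWeight w := by
  induction w generalizing init with
  | nil => simp [pvWeight]
  | cons c t ih => simp [pvWeight, List.foldl_cons, ih, List.map_cons, List.sum_cons]; ring

theorem pv_loopA_chain (ws : List (List Char)) (prev : Int) :
    pvLoopA ws 0 prev = decide (List.IsChain (· < ·) (prev :: ws.map pvWeight)) := by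
  induction ws generalizing prev with
  | nil => simp [pvLoopA]
  | cons w t ih =>
    simp only [pvLoopA, pv_foldl_weight, zero_add, List.map_cons, List.isChain_cons_cons]
    by_cases h : prev < pvWeight w
    · simp [h, ih]
    · simp [h]

theorem pv_go_inv (P : Char → Prop) (s cur : List Char) (acc : List (List Char))
    (hs : ∀ c ∈ s, P c) (hcur : ∀ c ∈ cur, P c)
    (hacc : ∀ w ∈ acc, w ≠ [] ∧ ∀ c ∈ w, P c) :
    ∀ w ∈ PySem.Chars.split₀.go s cur acc, w ≠ [] ∧ ∀ c ∈ w, P c := by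
  induction s generalizing cur acc with
  | nil =>
    intro w hw
    by_cases hc : cur.isEmpty
    · rw [PySem.Chars.split₀.go, if_pos hc, List.mem_reverse] at hw
      exact hacc w hw
    · rw [PySem.Chars.split₀.go, if_neg hc, List.mem_reverse, List.mem_cons] at hw
      rcases hw with rfl | hw
      · refine ⟨by simpa [List.isEmpty_iff] using hc, ?_⟩
        intro c hc'; exact hcur c (List.mem_reverse.mp hc')
      · exact hacc w hw
  | cons c rest ih =>
    intro w hw
    by_cases hsp : PySem.Chars.isspace c
    · by_cases hc : cur.isEmpty
      · rw [PySem.Chars.split₀.go, if_pos hsp, if_pos hc] at hw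
        exact ih _ _ (fun d hd => hs d (List.mem_cons_of_mem _ hd)) (by simp) hacc w hw
      · rw [PySem.Chars.split₀.go, if_pos hsp, if_neg hc] at hw
        refine ih _ _ (fun d hd => hs d (List.mem_cons_of_mem _ hd)) (by simp) ?_ w hw
        intro v hv
        rcases List.mem_cons.mp hv with rfl | hv'
        · exact ⟨by simpa [List.isEmpty_iff] using hc,
            fun d hd => hcur d (List.mem_reverse.mp hd)⟩
        · exact hacc v hv'
    · rw [PySem.Chars.split₀.go, if_neg hsp] at hw
      refine ih _ _ (fun d hd => hs d (List.mem_cons_of_mem _ hd)) ?_ hacc w hw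
      intro d hd
      rcases List.mem_cons.mp hd with rfl | hd'
      · exact hs d List.mem_cons_self
      · exact hcur d hd'

theorem pv_split₀_inv (P : Char → Prop) (s : List Char) (hs : ∀ c ∈ s, P c) :
    ∀ w ∈ PySem.Chars.split₀ s, w ≠ [] ∧ ∀ c ∈ w, P c := by
  exact pv_go_inv P s [] [] hs (by simp) (by simp)

theorem pv_weight_pos (w : List Char) (hne : w ≠ []) (hpos : ∀ c ∈ w, 0 < (c.toNat : Int)) :
    0 < pvWeight w := by
  cases w with
  | nil => exact absurd rfl hne
  | cons c t =>
    have h1 : (0:Int) ≤ (t.map (fun c => (c.toNat : Int))).sum := by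
      apply List.sum_nonneg
      intro x hx
      rcases List.mem_map.mp hx with ⟨d, _, rfl⟩
      positivity
    have h2 := hpos c List.mem_cons_self
    simp only [pvWeight, List.map_cons, List.sum_cons]
    omega

-- foldl Set.add over a duplicate-free list just appends each element
theorem pv_foldl_add_nodup (l acc : List Int) (h : (acc ++ l).Nodup) :
    l.foldl PySem.Set.add acc = acc ++ l := by
  induction l generalizing acc with
  | nil => simp
  | cons x t ih =>
    have hx : x ∉ acc := by
      intro hmem
      exact (List.disjoint_of_nodup_append h) hmem List.mem_cons_self
    have hadd : PySem.Set.add acc x = acc ++ [x] := by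
      simp [PySem.Set.add, PySem.Set.contains, hx]
    rw [List.foldl_cons, hadd, ih (acc ++ [x]) (by simpa using h)]
    simp

theorem pv_ofList_nodup (l : List Int) (h : l.Nodup) : PySem.Set.ofList l = l := by
  have := pv_foldl_add_nodup l [] (by simpa using h)
  simpa [PySem.Set.ofList_eq_foldl] using this

-- a list of ints equals sorted(set(itself)) iff it is strictly increasing
theorem pv_sorted_set_iff (l : List Int) :
    l = PySem.List.sorted (PySem.Set.ofList l) (fun x => x) false ↔
      List.Pairwise (· < ·) l := by
  constructor
  · intro h
    have := PySem.List.sorted_ofList_pairwise_lt (xs := l)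
    rw [← h] at this
    exact this
  · intro hp
    have hnd : l.Nodup := hp.imp (fun hab => ne_of_lt hab)
    rw [pv_ofList_nodup l hnd]
    exact (PySem.List.sorted_eq_of_perm_of_pairwise_lt l l (fun x => x) (List.Perm.refl l) hp).symm

-- ===== VERDICT (by name: the statement is the Claim_ definition above) =====
theorem increasing_word_weights_spec : Claim_equal_increasing_word_weights := by
  intro s hdom
  unfold Spec_increasing_word_weights increasing_word_weights increasing_word_weights_alt
  have hchars : ∀ c ∈ pvClean s.toList, 0 < (c.toNat : Int) := by
    intro c hc
    have hmem : c ∈ s.toList := List.mem_of_mem_filter hc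
    have hdc : pvDomChar c = true := (List.all_eq_true.mp hdom) c hmem
    simp only [pvDomChar, Bool.or_eq_true, Bool.and_eq_true, decide_eq_true_eq,
      beq_iff_eq] at hdc
    omega
  have hwords := pv_split₀_inv (fun c => 0 < (c.toNat : Int)) (pvClean s.toList) hchars
  rw [pv_loopA_chain]
  have hiff : List.IsChain (· < ·) (0 :: (PySem.Chars.split₀ (pvClean s.toList)).map pvWeight)
      ↔ List.Pairwise (· < ·) ((PySem.Chars.split₀ (pvClean s.toList)).map pvWeight) := by
    cases hsp : PySem.Chars.split₀ (pvClean s.toList) with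
    | nil => simp
    | cons w ws =>
      have hw := hwords w (by rw [hsp]; exact List.mem_cons_self)
      have hpos : 0 < pvWeight w := pv_weight_pos w hw.1 hw.2
      rw [List.map_cons, List.isChain_cons_cons, List.isChain_iff_pairwise]
      exact ⟨fun h => h.2, fun h => ⟨hpos, h⟩⟩
  rw [show (decide (List.IsChain (· < ·)
        (0 :: (PySem.Chars.split₀ (pvClean s.toList)).map pvWeight))) =
      ((PySem.Chars.split₀ (pvClean s.toList)).map pvWeight ==
        PySem.List.sorted (PySem.Set.ofList ((PySem.Chars.split₀ (pvClean s.toList)).map pvWeight)) (fun x => x) false)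
    from ?_]
  rw [Bool.eq_iff_iff]
  simp only [decide_eq_true_eq, beq_iff_eq]
  rw [hiff, pv_sorted_set_iff]
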